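-- pv_equiv track=rewrite | github.com/joeyschmidt97/fusion_research | ARCHIVE/GENE_code_V5/read_simulation_data/criteria_checker/criteria_parser_V4.py | units_from_variable
-- ===== SOURCE A (Python) =====
-- def units_from_variable(variable_w_units: str):
--     """
--     Extract the variable name and optional units from a string in the format 'variable_name(units)'.
--
--     Parameters:
--     - variable_w_units (str): A string containing a variable name and optional units in parentheses.
--
--     Returns:
--     - tuple: A tuple containing the variable name and units. If there are no units, the units will be None.
--
--     """
--     if ("(" in variable_w_units) or (")" in variable_w_units):
--
--         parenthesis_structure = ''.join(char for char in variable_w_units if char in '()')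
--         parenthesis_mismatch = (parenthesis_structure != '()')
--
--         if not parenthesis_mismatch:
--             units = ''.join(variable_w_units.split('(')[-1].rsplit(')')[0])
--             variable = variable_w_units.split('(')[0]
--
--             units_empty = (units == '')
--
--         if parenthesis_mismatch or units_empty:
--             raise ValueError(f"Please ensure input '{variable_w_units}' is written with parentheses as 'variable_name(units)'")
--     else:
--         units = None
--         variable = variable_w_units
--
--     return variable, units
-- ===== SOURCE B (Python) =====
-- def units_from_variable(variable_w_units: str):
--     # Single left-to-right scan with a 3-state machine instead of A's
--     # filter/join/split/rsplit passes.  Same return values, same ValueError.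
--     if '(' not in variable_w_units and ')' not in variable_w_units:
--         return variable_w_units, None
--     name = []
--     units = []
--     state = 0  # 0: before '(', 1: inside the parentheses, 2: after ')'
--     ok = True
--     for ch in variable_w_units:
--         if ch == '(':
--             if state == 0:
--                 state = 1
--             else:
--                 ok = False
--                 break
--         elif ch == ')':
--             if state == 1:
--                 state = 2
--             else:
--                 ok = False
--                 break
--         elif state == 0:
--             name.append(ch)
--         elif state == 1:
--             units.append(ch)
--     if not ok or state != 2 or not units:
--         raise ValueError(f"Please ensure input '{variable_w_units}' is written with parentheses as 'variable_name(units)'")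
--     return ''.join(name), ''.join(units)
-- ===== Notes on version B (the rewrite author's own statement) =====
-- stated objective: alternative
-- what changed: Replaces A's multi-pass filter/join + split/rsplit parsing with a single left-to-right scan using a 3-state machine that collects name and units in one pass; Pre_ excludes only the inputs on which A raises ValueError (mismatched parentheses or empty units), where B raises the same ValueError.
-- outside the precondition, e.g. on units_from_variable('()'): A raises ValueError, B raises ValueError; on units_from_variable('a)b('): A raises ValueError, B raises ValueError
import Mathlib
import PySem

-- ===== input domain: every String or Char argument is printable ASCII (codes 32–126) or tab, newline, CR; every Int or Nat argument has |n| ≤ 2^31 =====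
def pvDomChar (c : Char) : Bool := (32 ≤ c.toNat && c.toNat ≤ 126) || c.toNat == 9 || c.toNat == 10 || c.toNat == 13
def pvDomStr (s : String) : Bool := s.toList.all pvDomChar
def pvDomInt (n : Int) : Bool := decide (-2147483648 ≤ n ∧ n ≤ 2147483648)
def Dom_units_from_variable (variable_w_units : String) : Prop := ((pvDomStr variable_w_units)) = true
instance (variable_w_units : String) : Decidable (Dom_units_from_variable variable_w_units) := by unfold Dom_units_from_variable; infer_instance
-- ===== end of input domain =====

-- B replaces A's filter/join + split/rsplit passes by one left-to-right 3-state scan;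
-- equivalence is claimed on all inputs where A returns (Pre_ excludes exactly A's ValueError inputs).

-- ===== PORT A =====
-- Python's `raise ValueError` paths return the dummy ("", none); those inputs are outside Pre_.
-- `rsplit(')')` with no maxsplit yields the same pieces as `split(')')`, so both are PySem.Chars.splitOn.
-- split results are always nonempty, so `[-1]`/`[0]` are ported as getLastD []/headD [] (exact here).
-- `''.join(<string>)` is the identity and is dropped.
def units_from_variable (variable_w_units : String) : String × Option String :=
  let cs := variable_w_units.toList
  if ('(' ∈ cs) ∨ (')' ∈ cs) then
    let parenthesis_structure := cs.filter (fun c => c == '(' || c == ')')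
    -- Python computes `parenthesis_mismatch` then guards; units/variable only exist when it is false
    if parenthesis_structure = ['(', ')'] then
      let pieces := PySem.Chars.splitOn cs ['(']
      let units := (PySem.Chars.splitOn (pieces.getLastD []) [')']).headD []
      let variable_name := pieces.headD []
      if units = [] then ("", none)  -- raise ValueError (excluded by Pre_)
      else (String.ofList variable_name, some (String.ofList units))
    else ("", none)  -- raise ValueError (excluded by Pre_)
  else (variable_w_units, none)

-- ===== PORT B =====
-- Source B's for-loop with `state`, `ok`, `name`, `units` and early `break`, as structural recursion
def pvScanB : List Char → Nat → List Char → List Char → Bool × Nat × List Char × List Char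
  | [], st, nm, un => (true, st, nm, un)
  | c :: rest, st, nm, un =>
    if c = '(' then
      if st = 0 then pvScanB rest 1 nm un else (false, st, nm, un)
    else if c = ')' then
      if st = 1 then pvScanB rest 2 nm un else (false, st, nm, un)
    else if st = 0 then pvScanB rest st (nm ++ [c]) un
    else if st = 1 then pvScanB rest st nm (un ++ [c])
    else pvScanB rest st nm un

def units_from_variable_alt (variable_w_units : String) : String × Option String :=
  let cs := variable_w_units.toList
  if '(' ∉ cs ∧ ')' ∉ cs then (variable_w_units, none)
  else
    match pvScanB cs 0 [] [] with
    | (ok, st, nm, un) =>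
      if ok = false ∨ st ≠ 2 ∨ un = [] then ("", none)  -- raise ValueError (excluded by Pre_)
      else (String.ofList nm, some (String.ofList un))

-- ===== PRECONDITION & SPEC =====
-- Pre_ excludes exactly the inputs where Python A raises ValueError: parenthesis structure not
-- exactly "(…)" or empty units (i.e. "()" adjacent); B raises the identical ValueError there.
def Pre_units_from_variable (variable_w_units : String) : Prop :=
  let cs := variable_w_units.toList
  ('(' ∉ cs ∧ ')' ∉ cs) ∨
    (cs.filter (fun c => c == '(' || c == ')') = ['(', ')'] ∧ ¬ ['(', ')'] <:+: cs)
instance (variable_w_units : String) : Decidable (Pre_units_from_variable variable_w_units) := by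
  unfold Pre_units_from_variable; infer_instance
def pvWitness_units_from_variable : String := "omega_n(cs/a)"

def Spec_units_from_variable (variable_w_units : String) (out : String × Option String) : Prop := out = units_from_variable_alt variable_w_units
instance (variable_w_units : String) (out : String × Option String) : Decidable (Spec_units_from_variable variable_w_units out) := by unfold Spec_units_from_variable; infer_instance

-- ===== CLAIM (what is proved, stated in full; the proofs are below) =====
def Claim_equal_units_from_variable : Prop := ∀ (variable_w_units : String), Dom_units_from_variable variable_w_units → Pre_units_from_variable variable_w_units → Spec_units_from_variable variable_w_units (units_from_variable variable_w_units)

-- ===== LEMMAS AND PROOFS =====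

-- A-side: splitOn with a single-character separator on separator-free input
theorem pv_go_no_sep (c : Char) (u : List Char) : ∀ (fuel : Nat) (cur : List Char)
    (acc : List (List Char)), c ∉ u → u.length ≤ fuel →
    PySem.Chars.splitOn.go [c] fuel u cur acc = acc.reverse ++ [cur.reverse ++ u] := by
  induction u with
  | nil =>
    intro fuel cur acc _ _
    cases fuel <;> simp [PySem.Chars.splitOn.go]
  | cons a u ih =>
    intro fuel cur acc hc hf
    cases fuel with
    | zero => simp at hf
    | succ f =>
      have hne : ¬ (c == a) = true := by
        simp only [beq_iff_eq]; rintro rfl; exact hc (List.mem_cons_self)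
      rw [PySem.Chars.splitOn.go]
      simp only [List.isPrefixOf, hne, Bool.false_and, if_neg Bool.false_ne_true]
      rw [ih f (a :: cur) acc (fun h => hc (List.mem_cons_of_mem _ h)) (by simpa using Nat.lt_succ_iff.mp (Nat.lt_of_lt_of_le (Nat.lt_succ_self _) hf))]
      simp

theorem pv_go_split (c : Char) (u : List Char) : ∀ (r : List Char) (fuel : Nat)
    (cur : List Char) (acc : List (List Char)), c ∉ u → c ∉ r →
    u.length + r.length + 1 ≤ fuel →
    PySem.Chars.splitOn.go [c] fuel (u ++ c :: r) cur acc =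
      acc.reverse ++ [cur.reverse ++ u, r] := by
  induction u with
  | nil =>
    intro r fuel cur acc _ hr hf
    cases fuel with
    | zero => simp at hf
    | succ f =>
      rw [List.nil_append, PySem.Chars.splitOn.go]
      simp only [List.isPrefixOf, beq_self_eq_true, Bool.true_and, if_true, List.length_cons, List.length_nil,
        List.drop_succ_cons, List.drop_zero]
      rw [pv_go_no_sep c r f [] (cur.reverse :: acc) hr (by omega)]
      simp
  | cons a u ih =>
    intro r fuel cur acc hc hr hf
    cases fuel with
    | zero => simp at hf
    | succ f =>
      have hne : ¬ (c == a) = true := by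
        simp only [beq_iff_eq]; rintro rfl; exact hc (List.mem_cons_self)
      rw [List.cons_append, PySem.Chars.splitOn.go]
      simp only [List.isPrefixOf, hne, Bool.false_and, if_neg Bool.false_ne_true]
      rw [ih r f (a :: cur) acc (fun h => hc (List.mem_cons_of_mem _ h)) hr (by simp only [List.length_cons] at hf; omega)]
      simp

theorem pv_splitOn_single (c : Char) (u r : List Char) (hu : c ∉ u) (hr : c ∉ r) :
    PySem.Chars.splitOn (u ++ c :: r) [c] = [u, r] := by
  rw [PySem.Chars.splitOn, pv_go_split c u r _ [] [] hu hr (by simp)]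
  simp

-- B-side: the scanner across separator-free segments
theorem pv_scan0 (u : List Char) : ∀ (rest nm un : List Char), '(' ∉ u → ')' ∉ u →
    pvScanB (u ++ rest) 0 nm un = pvScanB rest 0 (nm ++ u) un := by
  induction u with
  | nil => intro rest nm un _ _; simp
  | cons a u ih =>
    intro rest nm un h1 h2
    have ha1 : a ≠ '(' := fun h => h1 (h ▸ List.mem_cons_self)
    have ha2 : a ≠ ')' := fun h => h2 (h ▸ List.mem_cons_self)
    rw [List.cons_append, pvScanB, if_neg ha1, if_neg ha2, if_pos rfl,
      ih rest (nm ++ [a]) un (fun h => h1 (List.mem_cons_of_mem _ h))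
        (fun h => h2 (List.mem_cons_of_mem _ h))]
    simp

theorem pv_scan1 (v : List Char) : ∀ (rest nm un : List Char), '(' ∉ v → ')' ∉ v →
    pvScanB (v ++ rest) 1 nm un = pvScanB rest 1 nm (un ++ v) := by
  induction v with
  | nil => intro rest nm un _ _; simp
  | cons a v ih =>
    intro rest nm un h1 h2
    have ha1 : a ≠ '(' := fun h => h1 (h ▸ List.mem_cons_self)
    have ha2 : a ≠ ')' := fun h => h2 (h ▸ List.mem_cons_self)
    rw [List.cons_append, pvScanB, if_neg ha1, if_neg ha2, if_neg (by decide), if_pos rfl,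
      ih rest nm (un ++ [a]) (fun h => h1 (List.mem_cons_of_mem _ h))
        (fun h => h2 (List.mem_cons_of_mem _ h))]
    simp

theorem pv_scan2 (w : List Char) : ∀ (nm un : List Char), '(' ∉ w → ')' ∉ w →
    pvScanB w 2 nm un = (true, 2, nm, un) := by
  induction w with
  | nil => intro nm un _ _; rfl
  | cons a w ih =>
    intro nm un h1 h2
    have ha1 : a ≠ '(' := fun h => h1 (h ▸ List.mem_cons_self)
    have ha2 : a ≠ ')' := fun h => h2 (h ▸ List.mem_cons_self)
    rw [pvScanB, if_neg ha1, if_neg ha2, if_neg (by decide), if_neg (by decide),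
      ih nm un (fun h => h1 (List.mem_cons_of_mem _ h)) (fun h => h2 (List.mem_cons_of_mem _ h))]

-- ===== VERDICT (by name: the statement is the Claim_ definition above) =====
theorem units_from_variable_spec : Claim_equal_units_from_variable := by
  intro s _ pre
  unfold Spec_units_from_variable
  rcases pre with ⟨h1, h2⟩ | ⟨hf, hinf⟩
  · simp [units_from_variable, units_from_variable_alt, h1, h2]
  · -- decompose s.toList as u ++ '(' :: v ++ ')' :: w with u, v, w parenthesis-free
    rw [List.filter_eq_cons_iff] at hf
    obtain ⟨u, t, hcs, hu, -, ht⟩ := hf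
    rw [List.filter_eq_cons_iff] at ht
    obtain ⟨v, w, ht, hv, -, hw⟩ := ht
    rw [List.filter_eq_nil_iff] at hw
    subst ht
    have hpar : ∀ (l : List Char), (∀ b ∈ l, ¬(b == '(' || b == ')') = true) →
        '(' ∉ l ∧ ')' ∉ l := by
      intro l h
      constructor <;> intro hm <;> have := h _ hm <;> simp at this
    have hwp : '(' ∉ w ∧ ')' ∉ w := by
      constructor <;> intro hm <;> have := hw _ hm <;> simp at this
    obtain ⟨hu1, hu2⟩ := hpar u hu
    obtain ⟨hv1, hv2⟩ := hpar v hv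
    have hvne : v ≠ [] := by
      rintro rfl
      exact hinf ⟨u, w, by simpa using hcs.symm⟩
    have hmem : '(' ∈ s.toList := by rw [hcs]; simp
    have hsplit1 : PySem.Chars.splitOn s.toList ['('] = [u, v ++ ')' :: w] := by
      rw [hcs]
      exact pv_splitOn_single '(' u (v ++ ')' :: w) hu1 (by simp [hv1, hwp.1])
    have hsplit2 : PySem.Chars.splitOn (v ++ ')' :: w) [')'] = [v, w] :=
      pv_splitOn_single ')' v w hv2 hwp.2
    have hA : units_from_variable s = (String.ofList u, some (String.ofList v)) := by
      rw [units_from_variable]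
      simp only [if_pos (Or.inl hmem)]
      rw [if_pos (by rw [hcs]; simp [List.filter_append, List.filter_eq_nil_iff.mpr hu,
        List.filter_eq_nil_iff.mpr hv, List.filter_eq_nil_iff.mpr hw])]
      rw [hsplit1]
      simp only [List.getLastD, List.getLast, List.headD]
      rw [hsplit2]
      simp [hvne]
    have hB : units_from_variable_alt s = (String.ofList u, some (String.ofList v)) := by
      rw [units_from_variable_alt]
      simp only
      rw [if_neg (by simp [hmem])]
      have hscan : pvScanB s.toList 0 [] [] = (true, 2, u, v) := by
        rw [hcs, pv_scan0 u _ [] [] hu1 hu2]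
        simp only [List.nil_append]
        rw [show pvScanB ('(' :: (v ++ ')' :: w)) 0 u [] = pvScanB (v ++ ')' :: w) 1 u [] from
          by simp [pvScanB]]
        rw [pv_scan1 v _ u [] hv1 hv2]
        simp only [List.nil_append]
        rw [show pvScanB (')' :: w) 1 u v = pvScanB w 2 u v from by simp [pvScanB]]
        exact pv_scan2 w u v hwp.1 hwp.2
      rw [hscan]
      simp [hvne]
    rw [hA, hB]
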